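-- pv_equiv track=rewrite | github.com/world137/study2 | test3.py | RtoL
-- ===== SOURCE A (Python) =====
-- def RtoL(arr,k):
--     lst = []
--     i = len(arr)-1
--     cnt = 0
--     while(i > 0):
--         j = 1
--         if(arr[i] == "G"):
--             while(j <= k):
--                 if(i-j >= 0 and arr[i-j] == "P"):
--                     cnt += 1
--                     arr[i] = 'Gride'
--                     arr[i-j] = 'Ppick'
--                     lst.append([i, i - j])
--                     break
--                 j += 1
--         i = i - 1
--     return cnt,arr,lst
-- ===== SOURCE B (Python) =====
-- # Staged rewrite: pass 1 computes the match pairs purely from the original array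
-- # (P positions precomputed once, consumed right-to-left as a stack -- no per-G window
-- # rescan, no interleaved writes); pass 2 applies every mutation to arr at once.
-- # Like A, mutates arr in place (same cells get the same values).
-- def RtoL(arr, k):
--     ps = [i for i, x in enumerate(arr) if x == "P"]  # ascending; consumed as a stack
--     pairs = []
--     for i in range(len(arr) - 1, 0, -1):
--         if arr[i] == "G":
--             while ps and ps[-1] >= i:
--                 ps.pop()
--             if ps and ps[-1] >= i - k:
--                 pairs.append([i, ps.pop()])
--     for g, p in pairs:
--         arr[g] = 'Gride'
--         arr[p] = 'Ppick'
--     return len(pairs), arr, pairs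
-- ===== Notes on version B (the rewrite author's own statement) =====
-- stated objective: alternative
-- what changed: Replaces A's in-place loop with per-G backward window rescans by a staged pipeline: one pure pass consuming a precomputed stack of P positions yields the match pairs (no inner scan, no interleaved writes), then all array mutations are applied in a single final pass and the count is len(pairs).
import Mathlib
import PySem

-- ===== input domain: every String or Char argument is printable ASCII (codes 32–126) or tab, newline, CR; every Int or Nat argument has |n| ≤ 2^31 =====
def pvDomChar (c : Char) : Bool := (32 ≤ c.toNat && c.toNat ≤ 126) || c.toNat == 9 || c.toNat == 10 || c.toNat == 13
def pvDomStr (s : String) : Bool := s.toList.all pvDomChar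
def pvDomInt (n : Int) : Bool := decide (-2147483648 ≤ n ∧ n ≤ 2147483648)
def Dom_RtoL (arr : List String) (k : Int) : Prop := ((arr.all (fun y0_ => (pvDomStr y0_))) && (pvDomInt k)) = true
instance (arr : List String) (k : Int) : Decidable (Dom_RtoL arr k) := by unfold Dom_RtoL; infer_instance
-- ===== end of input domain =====

-- B is a staged rewrite: match pairs are computed purely from the original array (P positions
-- as a stack), then all mutations are applied at once; both Pythons mutate `arr` in place
-- identically — the theorem is about the returned triple.

-- ===== PORT A =====
-- A's inner `while j <= k` scan from position i: first hit i-j with arr[i-j]=="P", else none.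
-- Indices handed to pyGetD here are always in range (0 ≤ i-j < i < len), so the default "" is never used.
def RtoL_inner (arr : List String) (k i j : Int) : Option Int :=
  if _h : j ≤ k then
    if 0 ≤ i - j ∧ PySem.List.pyGetD arr (i - j) "" = "P" then some (i - j)
    else RtoL_inner arr k i (j + 1)
  else none
termination_by (k + 1 - j).toNat
decreasing_by omega

-- the `while i > 0` loop, counter = current index i (Python's int i equals this Nat throughout);
-- the array is rewritten in place as the loop walks down, as in A.
def RtoL_loop (k : Int) : Nat → List String → Int → List (List Int) → Int × List String × List (List Int)
  | 0, arr, cnt, lst => (cnt, arr, lst)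
  | Nat.succ i, arr, cnt, lst =>
    if PySem.List.pyGetD arr ((i + 1 : Nat) : Int) "" = "G" then
      match RtoL_inner arr k ((i + 1 : Nat) : Int) 1 with
      | some q =>
        RtoL_loop k i ((arr.set (i + 1) "Gride").set q.toNat "Ppick") (cnt + 1)
          (lst ++ [[((i + 1 : Nat) : Int), q]])
      | none => RtoL_loop k i arr cnt lst
    else RtoL_loop k i arr cnt lst

def RtoL (arr : List String) (k : Int) : Int × List String × List (List Int) :=
  RtoL_loop k (arr.length - 1) arr 0 []

-- ===== PORT B =====
-- ps = [i for i, x in enumerate(arr) if x == "P"]  (ascending P positions)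
def RtoL_alt_ps (arr : List String) : List Int :=
  ((PySem.List.enumerate arr).filter (fun p => p.2 = "P")).map (fun p => p.1)

-- `while ps and ps[-1] >= i: ps.pop()` — the stack is kept top-first in Lean (reverse of the
-- Python ascending list), so popping from the Python end is taking the head here.
def RtoL_alt_skip (i : Int) : List Int → List Int
  | [] => []
  | q :: rest => if q ≥ i then RtoL_alt_skip i rest else q :: rest

-- pass 1: the `for i in range(len(arr)-1, 0, -1)` loop; reads only the ORIGINAL array,
-- carries only the stack, produces the pair list
def RtoL_alt_pick (k : Int) : Nat → List String → List Int → List (List Int)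
  | 0, _, _ => []
  | Nat.succ i, arr, ps =>
    if PySem.List.pyGetD arr ((i + 1 : Nat) : Int) "" = "G" then
      match RtoL_alt_skip ((i + 1 : Nat) : Int) ps with
      | q :: rest =>
        if q ≥ ((i + 1 : Nat) : Int) - k then
          [((i + 1 : Nat) : Int), q] :: RtoL_alt_pick k i arr rest
        else RtoL_alt_pick k i arr (q :: rest)
      | [] => RtoL_alt_pick k i arr []
    else RtoL_alt_pick k i arr ps

-- pass 2: `for g, p in pairs: arr[g] = 'Gride'; arr[p] = 'Ppick'` (all indices produced by
-- pass 1 are nonnegative and in range, so .toNat is exact)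
def RtoL_alt_apply : List String → List (List Int) → List String
  | arr, [] => arr
  | arr, [g, p] :: rest => RtoL_alt_apply ((arr.set g.toNat "Gride").set p.toNat "Ppick") rest
  | arr, _ :: rest => RtoL_alt_apply arr rest

def RtoL_alt (arr : List String) (k : Int) : Int × List String × List (List Int) :=
  let pairs := RtoL_alt_pick k (arr.length - 1) arr (RtoL_alt_ps arr).reverse
  ((pairs.length : Int), RtoL_alt_apply arr pairs, pairs)

-- ===== PRECONDITION & SPEC =====
def Spec_RtoL (arr : List String) (k : Int) (out : Int × List String × List (List Int)) : Prop := out = RtoL_alt arr k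
instance (arr : List String) (k : Int) (out : Int × List String × List (List Int)) : Decidable (Spec_RtoL arr k out) := by unfold Spec_RtoL; infer_instance

-- ===== CLAIM (what is proved, stated in full; the proofs are below) =====
def Claim_equal_RtoL : Prop := ∀ (arr : List String) (k : Int), Dom_RtoL arr k → Spec_RtoL arr k (RtoL arr k)

-- ===== LEMMAS AND PROOFS =====

-- proof-only intermediate: A's loop re-expressed with the availability stack (this is NOT
-- either port; it bridges A's in-place rescanning loop and B's staged pure pass)
def pvStackLoop (k : Int) : Nat → List String → List Int → Int → List (List Int) → Int × List String × List (List Int)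
  | 0, arr, _, cnt, lst => (cnt, arr, lst)
  | Nat.succ i, arr, ps, cnt, lst =>
    if PySem.List.pyGetD arr ((i + 1 : Nat) : Int) "" = "G" then
      match RtoL_alt_skip ((i + 1 : Nat) : Int) ps with
      | q :: rest =>
        if ((i + 1 : Nat) : Int) - k ≤ q then
          pvStackLoop k i ((arr.set (i + 1) "Gride").set q.toNat "Ppick") rest (cnt + 1)
            (lst ++ [[((i + 1 : Nat) : Int), q]])
        else pvStackLoop k i arr (q :: rest) cnt lst
      | [] => pvStackLoop k i arr [] cnt lst
    else pvStackLoop k i arr ps cnt lst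

-- loop invariant: ps is a strictly descending list of in-range indices, and below the counter c
-- it holds exactly the positions currently containing "P"
def PvInv (arr : List String) (c : Nat) (ps : List Int) : Prop :=
  List.Pairwise (fun a b => a > b) ps ∧
  (∀ q ∈ ps, 0 ≤ q ∧ q < (arr.length : Int)) ∧
  (∀ q : Int, 0 ≤ q → q < (c : Int) → (q ∈ ps ↔ PySem.List.pyGetD arr q "" = "P"))

lemma pvGetD_oob (arr : List String) (q : Int) (d : String) (_h0 : 0 ≤ q)
    (h1 : (arr.length : Int) ≤ q) : PySem.List.pyGetD arr q d = d := by
  apply PySem.List.pyGetD_of_none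
  rw [PySem.List.pyGet?_eq_none_iff]
  intro hr
  unfold PySem.Raise.InRange at hr
  omega

lemma pvSkip_eq_filter (i : Int) : ∀ ps : List Int, List.Pairwise (fun a b => a > b) ps →
    RtoL_alt_skip i ps = ps.filter (fun q => decide (q < i)) := by
  intro ps
  induction ps with
  | nil => intro _; rfl
  | cons q rest ih =>
    intro hp
    rw [List.pairwise_cons] at hp
    unfold RtoL_alt_skip
    by_cases hq : q ≥ i
    · rw [if_pos hq, ih hp.2, List.filter_cons_of_neg (by simpa using (by omega : ¬ q < i))]
    · rw [if_neg hq, List.filter_cons_of_pos (by simpa using (by omega : q < i)),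
        List.filter_eq_self.2 ?_]
      intro x hx
      have := hp.1 x hx
      simp; omega

lemma pvSkip_sub (i : Int) : ∀ (ps : List Int) (x : Int), x ∈ RtoL_alt_skip i ps → x ∈ ps := by
  intro ps
  induction ps with
  | nil => intro x h; exact h
  | cons q rest ih =>
    intro x h
    unfold RtoL_alt_skip at h
    by_cases hq : q ≥ i
    · rw [if_pos hq] at h; exact List.mem_cons_of_mem q (ih x h)
    · rw [if_neg hq] at h; exact h

lemma pvInner_none (arr : List String) (k i : Int) :
    ∀ (n : Nat) (j : Int), (k + 1 - j).toNat ≤ n →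
    (∀ q : Int, 0 ≤ q → i - k ≤ q → q ≤ i - j → PySem.List.pyGetD arr q "" ≠ "P") →
    RtoL_inner arr k i j = none := by
  intro n
  induction n with
  | zero =>
    intro j hn _
    unfold RtoL_inner
    rw [dif_neg (by omega)]
  | succ n ih =>
    intro j hn hno
    unfold RtoL_inner
    by_cases hj : j ≤ k
    · rw [dif_pos hj, if_neg ?_]
      · exact ih (j + 1) (by omega) (fun q h0 hk hle => hno q h0 hk (by omega))
      · rintro ⟨h0, hP⟩
        exact hno (i - j) h0 (by omega) (by omega) hP
    · rw [dif_neg hj]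

lemma pvInner_some (arr : List String) (k i : Int) (q : Int) :
    ∀ (n : Nat) (j : Int), (k + 1 - j).toNat ≤ n →
    0 ≤ q → i - k ≤ q → q ≤ i - j → PySem.List.pyGetD arr q "" = "P" →
    (∀ q' : Int, q < q' → q' ≤ i - j → PySem.List.pyGetD arr q' "" ≠ "P") →
    RtoL_inner arr k i j = some q := by
  intro n
  induction n with
  | zero => intro j hn h0 hk hle _ _; omega
  | succ n ih =>
    intro j hn h0 hk hle hP hmax
    have hj : j ≤ k := by omega
    unfold RtoL_inner
    rw [dif_pos hj]
    by_cases he : q = i - j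
    · rw [if_pos ⟨by omega, by rw [← he]; exact hP⟩, he]
    · rw [if_neg ?_]
      · exact ih (j + 1) (by omega) h0 hk (by omega) hP
          (fun q' hq' hle' => hmax q' hq' (by omega))
      · rintro ⟨_, hP'⟩
        exact hmax (i - j) (by omega) (by omega) hP'

lemma pvLoop_eq (k : Int) :
    ∀ (c : Nat) (arr : List String) (ps : List Int) (cnt : Int) (lst : List (List Int)),
    PvInv arr c ps →
    RtoL_loop k c arr cnt lst = pvStackLoop k c arr ps cnt lst := by
  intro c
  induction c with
  | zero => intro arr ps cnt lst _; rfl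
  | succ i ih =>
    intro arr ps cnt lst hinv
    obtain ⟨hsort, hbnd, hmem⟩ := hinv
    unfold RtoL_loop pvStackLoop
    by_cases hG : PySem.List.pyGetD arr ((i + 1 : Nat) : Int) "" = "G"
    · rw [if_pos hG, if_pos hG]
      have hskip := pvSkip_eq_filter ((i + 1 : Nat) : Int) ps hsort
      -- membership in the skipped stack
      have hMmem : ∀ x : Int, x ∈ RtoL_alt_skip ((i + 1 : Nat) : Int) ps ↔
          (x ∈ ps ∧ x < ((i + 1 : Nat) : Int)) := by
        intro x; rw [hskip, List.mem_filter]; simp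
      cases hM : RtoL_alt_skip ((i + 1 : Nat) : Int) ps with
      | nil =>
        -- no available P below i+1 → A's scan finds nothing
        have hnoP : ∀ q : Int, 0 ≤ q → q < ((i + 1 : Nat) : Int) →
            PySem.List.pyGetD arr q "" ≠ "P" := by
          intro q h0 hlt hP
          have h1 : q ∈ RtoL_alt_skip ((i + 1 : Nat) : Int) ps :=
            (hMmem q).2 ⟨(hmem q h0 hlt).2 hP, hlt⟩
          rw [hM] at h1; exact absurd h1 (List.not_mem_nil)
        rw [pvInner_none arr k _ (k + 1 - 1).toNat 1 le_rfl
          (fun q h0 _ hle => hnoP q h0 (by omega))]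
        exact ih arr [] cnt lst
          ⟨List.Pairwise.nil, by simp, fun q h0 hlt => by
            constructor
            · intro h; exact absurd h (List.not_mem_nil)
            · intro hP; exact absurd (hnoP q h0 (by omega) hP) (fun h => h)⟩
      | cons q rest =>
        have hqin : q ∈ ps ∧ q < ((i + 1 : Nat) : Int) := (hMmem q).1 (by rw [hM]; simp)
        have hq0 : 0 ≤ q := (hbnd q hqin.1).1
        have hqlen : q < (arr.length : Int) := (hbnd q hqin.1).2
        have hqP : PySem.List.pyGetD arr q "" = "P" := (hmem q hq0 hqin.2).1 hqin.1
        -- q is the largest P position below i+1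
        have hMsort : List.Pairwise (fun a b => a > b) (q :: rest) := by
          rw [← hM, hskip]; exact hsort.filter _
        have hrest_lt : ∀ x ∈ rest, x < q := by
          intro x hx; exact (List.pairwise_cons.1 hMsort).1 x hx
        have hmax : ∀ q' : Int, q < q' → q' < ((i + 1 : Nat) : Int) →
            PySem.List.pyGetD arr q' "" ≠ "P" := by
          intro q' hgt hlt hP
          have h1 : q' ∈ ps := (hmem q' (by omega) hlt).2 hP
          have h2 : q' ∈ q :: rest := by rw [← hM]; exact (hMmem q').2 ⟨h1, hlt⟩
          rcases List.mem_cons.1 h2 with h | h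
          · omega
          · exact absurd (hrest_lt q' h) (by omega)
        -- invariant after removing q and overwriting positions i+1 and q
        have hinv' : PvInv ((arr.set (i + 1) "Gride").set q.toNat "Ppick") i rest := by
          refine ⟨(List.pairwise_cons.1 hMsort).2, ?_, ?_⟩
          · intro x hx
            have hxps : x ∈ ps := ((hMmem x).1 (by rw [hM]; exact List.mem_cons_of_mem q hx)).1
            have := hbnd x hxps
            simpa using this
          · intro x h0 hlt
            have hlt' : x < ((i + 1 : Nat) : Int) := by omega
            by_cases hxq : x = q
            · subst hxq
              have hv : PySem.List.pyGetD ((arr.set (i + 1) "Gride").set x.toNat "Ppick") x ""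
                  = "Ppick" := by
                rw [PySem.List.pyGetD_eq_getElem _ "" h0 (by simpa using hqlen)]
                have hq' : x.toNat < (arr.set (i + 1) "Gride").length := by simp; omega
                simp
              rw [hv]
              constructor
              · intro h; exact absurd (hrest_lt _ h) (by omega)
              · intro h; exact absurd h (by decide)
            · have hv : PySem.List.pyGetD ((arr.set (i + 1) "Gride").set q.toNat "Ppick") x ""
                  = PySem.List.pyGetD arr x "" := by
                by_cases hxlen : x < (arr.length : Int)
                · rw [PySem.List.pyGetD_eq_getElem _ "" h0 (by simpa using hxlen),
                    PySem.List.pyGetD_eq_getElem arr "" h0 hxlen]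
                  have h1 : ¬ (i + 1 = x.toNat) := by omega
                  have h2 : ¬ (q.toNat = x.toNat) := by omega
                  simp [h1, h2]
                · rw [pvGetD_oob _ _ _ h0 (by simp; omega), pvGetD_oob _ _ _ h0 (by omega)]
              rw [hv]
              constructor
              · intro hx
                exact (hmem x h0 hlt').1
                  ((hMmem x).1 (by rw [hM]; exact List.mem_cons_of_mem q hx)).1
              · intro hP
                have hxps : x ∈ ps := (hmem x h0 hlt').2 hP
                have hx2 : x ∈ q :: rest := by rw [← hM]; exact (hMmem x).2 ⟨hxps, hlt'⟩
                rcases List.mem_cons.1 hx2 with h | h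
                · exact absurd h hxq
                · exact h
        by_cases hk' : ((i + 1 : Nat) : Int) - k ≤ q
        · rw [pvInner_some arr k _ q (k + 1 - 1).toNat 1 le_rfl hq0 (by omega) (by omega) hqP
            (fun q' hgt hle => hmax q' hgt (by omega))]
          dsimp only
          rw [if_pos hk']
          exact ih _ rest (cnt + 1) _ hinv'
        · rw [pvInner_none arr k _ (k + 1 - 1).toNat 1 le_rfl ?_]
          · dsimp only
            rw [if_neg hk']
            refine ih arr (q :: rest) cnt lst ⟨hMsort, ?_, ?_⟩
            · intro x hx
              exact hbnd x ((hMmem x).1 (by rw [hM]; exact hx)).1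
            · intro x h0 hlt
              have hlt' : x < ((i + 1 : Nat) : Int) := by omega
              rw [← hM, hMmem x]
              constructor
              · intro h; exact (hmem x h0 hlt').1 h.1
              · intro hP; exact ⟨(hmem x h0 hlt').2 hP, hlt'⟩
          · intro x h0 hik hle hP
            have hxlt : x < ((i + 1 : Nat) : Int) := by omega
            have hxin : x ∈ q :: rest := by
              rw [← hM]; exact (hMmem x).2 ⟨(hmem x h0 hxlt).2 hP, hxlt⟩
            rcases List.mem_cons.1 hxin with h | h
            · omega
            · exact absurd (hrest_lt x h) (by omega)
    · rw [if_neg hG, if_neg hG]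
      exact ih arr ps cnt lst ⟨hsort, hbnd,
        fun q h0 hlt => hmem q h0 (by push_cast at hlt ⊢; omega)⟩

-- the stack loop equals B's staged form: same pairs picked from the ORIGINAL array (only the
-- "G"-ness of cells below the counter is read, and the loop's writes never change it), and the
-- writes commute out into one final application pass
lemma pvStack_staged (k : Int) :
    ∀ (c : Nat) (arr0 arr : List String) (ps : List Int) (cnt : Int) (lst : List (List Int)),
    arr.length = arr0.length →
    (∀ x : Int, 1 ≤ x → x ≤ (c : Int) →
      (PySem.List.pyGetD arr x "" = "G" ↔ PySem.List.pyGetD arr0 x "" = "G")) →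
    (∀ q ∈ ps, 0 ≤ q ∧ PySem.List.pyGetD arr0 q "" ≠ "G") →
    pvStackLoop k c arr ps cnt lst =
      (cnt + ((RtoL_alt_pick k c arr0 ps).length : Int),
       RtoL_alt_apply arr (RtoL_alt_pick k c arr0 ps),
       lst ++ RtoL_alt_pick k c arr0 ps) := by
  intro c
  induction c with
  | zero =>
    intro arr0 arr ps cnt lst _ _ _
    simp [pvStackLoop, RtoL_alt_pick, RtoL_alt_apply]
  | succ i ih =>
    intro arr0 arr ps cnt lst hlen hG hps
    have hGi : PySem.List.pyGetD arr ((i + 1 : Nat) : Int) "" = "G" ↔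
        PySem.List.pyGetD arr0 ((i + 1 : Nat) : Int) "" = "G" := by
      apply hG <;> push_cast <;> omega
    unfold pvStackLoop RtoL_alt_pick
    by_cases hg : PySem.List.pyGetD arr0 ((i + 1 : Nat) : Int) "" = "G"
    · rw [if_pos (hGi.2 hg), if_pos hg]
      cases hM : RtoL_alt_skip ((i + 1 : Nat) : Int) ps with
      | nil =>
        exact ih arr0 arr [] cnt lst hlen
          (fun x h1 hle => hG x h1 (by push_cast at hle ⊢; omega))
          (by intro q h; exact absurd h (List.not_mem_nil))
      | cons q rest =>
        have hqps : q ∈ ps := pvSkip_sub _ ps q (by rw [hM]; simp)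
        have hq0 : 0 ≤ q := (hps q hqps).1
        have hqG : PySem.List.pyGetD arr0 q "" ≠ "G" := (hps q hqps).2
        have hrest : ∀ x ∈ rest, 0 ≤ x ∧ PySem.List.pyGetD arr0 x "" ≠ "G" := by
          intro x hx
          exact hps x (pvSkip_sub _ ps x (by rw [hM]; exact List.mem_cons_of_mem q hx))
        dsimp only
        by_cases hk' : ((i + 1 : Nat) : Int) - k ≤ q
        · rw [if_pos hk', if_pos (by omega : q ≥ ((i + 1 : Nat) : Int) - k)]
          have harr' : ((arr.set (i + 1) "Gride").set q.toNat "Ppick").length = arr0.length := by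
            simp [hlen]
          have hG' : ∀ x : Int, 1 ≤ x → x ≤ (i : Int) →
              (PySem.List.pyGetD ((arr.set (i + 1) "Gride").set q.toNat "Ppick") x "" = "G" ↔
               PySem.List.pyGetD arr0 x "" = "G") := by
            intro x h1 hle
            by_cases hxlen : x < (arr0.length : Int)
            · rw [PySem.List.pyGetD_eq_getElem _ "" (by omega) (by rw [harr']; exact hxlen)]
              by_cases hxq : x = q
              · subst hxq
                rw [show ((arr.set (i + 1) "Gride").set x.toNat "Ppick")[x.toNat]'(by simp [hlen]; omega)
                    = "Ppick" by simp]
                constructor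
                · intro h; exact absurd h (by decide)
                · intro h; exact absurd h hqG
              · have h1' : ¬ (i + 1 = x.toNat) := by omega
                have h2' : ¬ (q.toNat = x.toNat) := by omega
                rw [show ((arr.set (i + 1) "Gride").set q.toNat "Ppick")[x.toNat]'(by simp [hlen]; omega)
                    = arr[x.toNat]'(by omega) by simp [h1', h2']]
                rw [← PySem.List.pyGetD_eq_getElem arr "" (by omega) (by omega)]
                exact hG x h1 (by push_cast at hle ⊢; omega)
            · rw [pvGetD_oob _ _ _ (by omega) (by rw [harr']; omega),
                pvGetD_oob _ _ _ (by omega) (by omega)]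
          rw [ih arr0 _ rest (cnt + 1) _ harr' hG' hrest]
          refine Prod.ext ?_ (Prod.ext ?_ ?_)
          · simp; ring
          · show RtoL_alt_apply _ _ = RtoL_alt_apply arr (([((i + 1 : Nat) : Int), q]) :: _)
            have : RtoL_alt_apply arr (([((i + 1 : Nat) : Int), q]) :: RtoL_alt_pick k i arr0 rest)
                = RtoL_alt_apply ((arr.set (((i + 1 : Nat) : Int)).toNat "Gride").set q.toNat "Ppick")
                    (RtoL_alt_pick k i arr0 rest) := rfl
            rw [this]
            simp
          · simp
        · rw [if_neg hk', if_neg (by omega : ¬ q ≥ ((i + 1 : Nat) : Int) - k)]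
          exact ih arr0 arr (q :: rest) cnt lst hlen
            (fun x h1 hle => hG x h1 (by push_cast at hle ⊢; omega))
            (by
              intro x hx
              rcases List.mem_cons.1 hx with h | h
              · subst h; exact ⟨hq0, hqG⟩
              · exact hrest x h)
    · rw [if_neg (fun h => hg (hGi.1 h)), if_neg hg]
      exact ih arr0 arr ps cnt lst hlen
        (fun x h1 hle => hG x h1 (by push_cast at hle ⊢; omega)) hps

lemma pvPs_mem (arr : List String) (q : Int) :
    q ∈ RtoL_alt_ps arr ↔ ∃ n : Nat, ∃ h : n < arr.length, q = (n : Int) ∧ arr[n] = "P" := by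
  unfold RtoL_alt_ps
  simp only [List.mem_map, List.mem_filter]
  constructor
  · rintro ⟨p, ⟨hp, hP⟩, rfl⟩
    rcases (PySem.List.mem_enumerate_iff _ _ _).1 hp with ⟨n, hn, rfl⟩
    exact ⟨n, hn, by simp, by simpa using hP⟩
  · rintro ⟨n, hn, rfl, hP⟩
    exact ⟨((n : Int), arr[n]), ⟨(PySem.List.mem_enumerate_iff _ _ _).2 ⟨n, hn, by simp⟩, by simpa using hP⟩, rfl⟩

lemma pvPs_sorted (arr : List String) :
    List.Pairwise (fun a b => a > b) (RtoL_alt_ps arr).reverse := by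
  rw [List.pairwise_reverse]
  unfold RtoL_alt_ps
  refine List.Pairwise.map _ (fun a b h => ?_) ((PySem.List.pairwise_lt_enumerate arr 0).filter _)
  exact h

lemma pvInit (arr : List String) (c : Nat) (hc : c ≤ arr.length) :
    PvInv arr c (RtoL_alt_ps arr).reverse := by
  refine ⟨pvPs_sorted arr, ?_, ?_⟩
  · intro q hq
    rw [List.mem_reverse, pvPs_mem] at hq
    rcases hq with ⟨n, hn, rfl, _⟩
    constructor <;> omega
  · intro q h0 hlt
    rw [List.mem_reverse, pvPs_mem]
    have hqlen : q < (arr.length : Int) := by omega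
    rw [PySem.List.pyGetD_eq_getElem arr "" h0 hqlen]
    constructor
    · rintro ⟨n, hn, rfl, hP⟩; simpa using hP
    · intro hP; exact ⟨q.toNat, by omega, by omega, hP⟩

lemma pvPsG (arr : List String) :
    ∀ q ∈ (RtoL_alt_ps arr).reverse, 0 ≤ q ∧ PySem.List.pyGetD arr q "" ≠ "G" := by
  intro q hq
  rw [List.mem_reverse, pvPs_mem] at hq
  rcases hq with ⟨n, hn, rfl, hP⟩
  refine ⟨by omega, ?_⟩
  rw [PySem.List.pyGetD_eq_getElem arr "" (by omega) (by exact_mod_cast hn)]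
  have : arr[((n:Int)).toNat]'(by simpa using hn) = "P" := by simpa using hP
  rw [this]
  decide

-- ===== VERDICT (by name: the statement is the Claim_ definition above) =====
theorem RtoL_spec : Claim_equal_RtoL := by
  unfold Claim_equal_RtoL
  intro arr k _
  unfold Spec_RtoL RtoL RtoL_alt
  rw [pvLoop_eq k (arr.length - 1) arr _ 0 [] (pvInit arr _ (by omega)),
    pvStack_staged k (arr.length - 1) arr arr _ 0 [] rfl (fun _ _ _ => Iff.rfl) (pvPsG arr)]
  simp
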